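-- pv_equiv track=rewrite | github.com/vllm-project/vllm | vllm/model_executor/models/molmo2.py | get_candidate_tilings
-- ===== SOURCE A (Python) =====
-- def get_candidate_tilings(max_num: int) -> list[tuple[int, int]]:
--     tilings = [
--         (i, j)
--         for i in range(1, max_num + 1)
--         for j in range(1, max_num + 1)
--         if i * j <= max_num
--     ]
--     return sorted(tilings, key=lambda x: (x[0] * x[1], x[0]))
-- ===== SOURCE B (Python) =====
-- def get_candidate_tilings(max_num: int) -> list[tuple[int, int]]:
--     # For each product p, find p's divisors up to sqrt(p) and mirror them to get all
--     # divisors in ascending order; emitting (d, p//d) per p yields the list already in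
--     # A's (product, first-component) sorted order, in O(n*sqrt(n)) instead of A's O(n^2).
--     result = []
--     for p in range(1, max_num + 1):
--         small = []
--         i = 1
--         while i * i <= p:
--             if p % i == 0:
--                 small.append(i)
--             i += 1
--         divs = small + [p // i for i in reversed(small) if i * i != p]
--         result += [(d, p // d) for d in divs]
--     return result
-- ===== Notes on version B (the rewrite author's own statement) =====
-- stated objective: faster
-- what changed: B replaces A's full double loop plus sort by a sqrt-bounded divisor enumeration per product p (small divisors up to sqrt(p), mirrored to the large ones), emitting the pairs directly in A's (product, i) order with no sort.
import Mathlib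
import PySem

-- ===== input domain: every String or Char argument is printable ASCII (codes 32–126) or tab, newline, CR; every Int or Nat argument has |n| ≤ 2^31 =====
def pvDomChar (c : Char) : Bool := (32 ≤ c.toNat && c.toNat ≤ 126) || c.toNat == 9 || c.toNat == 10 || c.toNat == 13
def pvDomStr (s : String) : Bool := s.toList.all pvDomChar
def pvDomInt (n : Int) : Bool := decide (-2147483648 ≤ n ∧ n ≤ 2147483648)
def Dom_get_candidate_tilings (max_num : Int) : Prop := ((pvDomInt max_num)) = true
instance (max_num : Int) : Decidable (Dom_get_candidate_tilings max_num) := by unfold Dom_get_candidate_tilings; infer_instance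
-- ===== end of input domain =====

-- B enumerates, per product p, the divisors of p only up to sqrt(p) and mirrors them,
-- emitting the pairs directly in A's (product, i) order with no sort.

-- ===== PORT A =====
def get_candidate_tilings (max_num : Int) : List (Int × Int) :=
  let tilings :=
    (PySem.List.pyRange 1 (max_num + 1) 1).flatMap (fun i =>
      ((PySem.List.pyRange 1 (max_num + 1) 1).filter
        (fun j => decide (i * j ≤ max_num))).map (fun j => (i, j)))
  PySem.List.sorted2 tilings (fun x => x.1 * x.2) (fun x => x.1)

-- ===== PORT B =====
-- 'small' while-loop of Source B: divisors of p in [i, sqrt(p)], ascending (while i*i <= p)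
def pvSmall (p i : Int) : List Int :=
  if h : i * i > p then []
  else
    if PySem.Int.mod p i == 0 then i :: pvSmall p (i + 1) else pvSmall p (i + 1)
termination_by (p + 1 - i).toNat
decreasing_by all_goals (rw [not_lt] at h; by_cases h0 : i ≤ 0
                         · have : i ≤ p := by nlinarith [mul_self_nonneg i]
                           omega
                         · have : i ≤ p := by nlinarith
                           omega)

-- 'divs' of Source B: small divisors plus the mirrored large ones
def pvDivs (p : Int) : List Int :=
  let small := pvSmall p 1
  small ++ (small.reverse.filter (fun i => !(i * i == p))).map (fun i => PySem.Int.floordiv p i)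

def get_candidate_tilings_alt (max_num : Int) : List (Int × Int) :=
  (PySem.List.pyRange 1 (max_num + 1) 1).foldl
    (fun result p => result ++ (pvDivs p).map (fun d => (d, PySem.Int.floordiv p d))) []

-- ===== PRECONDITION & SPEC =====
def Spec_get_candidate_tilings (max_num : Int) (out : List (Int × Int)) : Prop := out = get_candidate_tilings_alt max_num
instance (max_num : Int) (out : List (Int × Int)) : Decidable (Spec_get_candidate_tilings max_num out) := by unfold Spec_get_candidate_tilings; infer_instance

-- ===== CLAIM (what is proved, stated in full; the proofs are below) =====
def Claim_equal_get_candidate_tilings : Prop := ∀ (max_num : Int), Dom_get_candidate_tilings max_num → Spec_get_candidate_tilings max_num (get_candidate_tilings max_num)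

-- ===== LEMMAS AND PROOFS =====

-- A's sort key (x[0]*x[1], x[0]) as a value of the genuinely lexicographic order Lex (Int × Int)
def pvKeyPair (a b : Int) : Lex (Int × Int) := toLex (a, b)

def pvKey (x : Int × Int) : Lex (Int × Int) := toLex (x.1 * x.2, x.1)

-- A's unsorted comprehension, named for the proofs
def pvTilings (max_num : Int) : List (Int × Int) :=
  (PySem.List.pyRange 1 (max_num + 1) 1).flatMap (fun i =>
    ((PySem.List.pyRange 1 (max_num + 1) 1).filter
      (fun j => decide (i * j ≤ max_num))).map (fun j => (i, j)))

-- B's p-level block in closed (range) form, used to reason about pvDivisors/pvBuild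
def pvBlock (p : Int) : List (Int × Int) :=
  ((PySem.List.pyRange 1 (p + 1) 1).filter
    (fun i => PySem.Int.mod p i == 0)).map (fun i => (i, PySem.Int.floordiv p i))

-- sorted2 on two Int keys is sorted with the single lexicographic Lex (Int × Int) key
theorem sorted2_eq_sorted_lex {α : Type} (xs : List α) (k1 k2 : α → Int) :
    PySem.List.sorted2 xs k1 k2 = PySem.List.sorted xs (fun x => pvKeyPair (k1 x) (k2 x)) := by
  rw [PySem.List.sorted_eq_foldl_insertBy]
  have hbefore : (fun a b => decide (k1 a < k1 b) || (!decide (k1 b < k1 a) && decide (k2 a < k2 b)))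
      = fun a b => decide (pvKeyPair (k1 a) (k2 a) < pvKeyPair (k1 b) (k2 b)) := by
    funext a b
    rcases lt_trichotomy (k1 a) (k1 b) with h | h | h
    · simp [pvKeyPair, Prod.Lex.toLex_lt_toLex, h]
    · simp [pvKeyPair, Prod.Lex.toLex_lt_toLex, h]
    · simp [pvKeyPair, Prod.Lex.toLex_lt_toLex, h, lt_asymm h, ne_of_gt h]
  show List.foldl (fun acc x => PySem.List.insertBy _ x acc) [] xs = _
  rw [hbefore]
  simp only [Bool.false_eq_true, if_false]

theorem mem_pvTilings (max_num : Int) (x : Int × Int) :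
    x ∈ pvTilings max_num ↔ 1 ≤ x.1 ∧ 1 ≤ x.2 ∧ x.1 * x.2 ≤ max_num := by
  obtain ⟨a, b⟩ := x
  simp only [pvTilings, List.mem_flatMap, List.mem_map, List.mem_filter,
    PySem.List.mem_pyRange_one, decide_eq_true_eq, Prod.mk.injEq]
  constructor
  · rintro ⟨i, ⟨hi1, hi2⟩, j, ⟨⟨hj1, hj2⟩, hij⟩, rfl, rfl⟩
    exact ⟨hi1, hj1, hij⟩
  · rintro ⟨ha, hb, hab⟩
    refine ⟨a, ⟨ha, ?_⟩, b, ⟨⟨hb, ?_⟩, hab⟩, rfl, rfl⟩ <;> nlinarith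

theorem mem_alt (max_num : Int) (x : Int × Int) :
    x ∈ (PySem.List.pyRange 1 (max_num + 1) 1).flatMap pvBlock ↔
      1 ≤ x.1 ∧ 1 ≤ x.2 ∧ x.1 * x.2 ≤ max_num := by
  obtain ⟨a, b⟩ := x
  simp only [pvBlock, List.mem_flatMap, List.mem_map, List.mem_filter,
    PySem.List.mem_pyRange_one, beq_iff_eq, PySem.Int.mod, PySem.Int.floordiv, Prod.mk.injEq]
  constructor
  · rintro ⟨p, ⟨hp1, hp2⟩, i, ⟨⟨hi1, hi2⟩, hmod⟩, rfl, rfl⟩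
    have hdvd : i ∣ p := Int.dvd_iff_fmod_eq_zero.mpr hmod
    have hip : i * p.fdiv i = p := Int.mul_fdiv_cancel' hdvd
    refine ⟨hi1, ?_, by omega⟩
    nlinarith [hip]
  · rintro ⟨ha, hb, hab⟩
    refine ⟨a * b, ⟨by nlinarith, by omega⟩, a, ⟨⟨ha, by nlinarith⟩, ?_⟩, rfl, ?_⟩
    · exact Int.dvd_iff_fmod_eq_zero.mp ⟨b, rfl⟩
    · rw [Int.mul_fdiv_cancel_left b (by omega)]

theorem nodup_pvTilings (max_num : Int) : (pvTilings max_num).Nodup := by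
  unfold pvTilings
  rw [List.nodup_flatMap]
  constructor
  · intro i _
    exact ((PySem.List.nodup_pyRange_one 1 (max_num+1)).filter _).map
      (fun a b h => by simpa using congrArg Prod.snd h)
  · refine ((PySem.List.nodup_pyRange_one 1 (max_num+1)).pairwise_of_forall_ne ?_)
    intro i _ i' _ hne x hx hx'
    simp only [List.mem_map, List.mem_filter] at hx hx'
    obtain ⟨j, _, rfl⟩ := hx
    obtain ⟨j', _, h⟩ := hx'
    exact hne (by simpa using congrArg Prod.fst h.symm)

theorem nodup_alt (max_num : Int) :
    ((PySem.List.pyRange 1 (max_num + 1) 1).flatMap pvBlock).Nodup := by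
  rw [List.nodup_flatMap]
  constructor
  · intro p _
    exact ((PySem.List.nodup_pyRange_one 1 (p+1)).filter _).map
      (fun a b h => by simpa using congrArg Prod.fst h)
  · refine ((PySem.List.nodup_pyRange_one 1 (max_num+1)).pairwise_of_forall_ne ?_)
    intro p _ p' _ hne x hx hx'
    simp only [pvBlock, List.mem_map, List.mem_filter, PySem.List.mem_pyRange_one, beq_iff_eq,
      PySem.Int.mod, PySem.Int.floordiv] at hx hx'
    obtain ⟨i, ⟨_, hmod⟩, rfl⟩ := hx
    obtain ⟨i', ⟨_, hmod'⟩, h⟩ := hx'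
    have h1 : i' = i := by simpa using congrArg Prod.fst h
    have h2 : p'.fdiv i' = p.fdiv i := by simpa using congrArg Prod.snd h
    subst h1
    apply hne
    rw [← Int.mul_fdiv_cancel' (Int.dvd_iff_fmod_eq_zero.mpr hmod),
        ← Int.mul_fdiv_cancel' (Int.dvd_iff_fmod_eq_zero.mpr hmod'), h2]

-- every element of B's p-block has product exactly p
theorem pvBlock_prod (p : Int) (x : Int × Int) (hx : x ∈ pvBlock p) : x.1 * x.2 = p := by
  simp only [pvBlock, List.mem_map, List.mem_filter, beq_iff_eq,
    PySem.Int.mod, PySem.Int.floordiv] at hx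
  obtain ⟨i, ⟨_, hmod⟩, rfl⟩ := hx
  exact Int.mul_fdiv_cancel' (Int.dvd_iff_fmod_eq_zero.mpr hmod)

theorem pairwise_alt (max_num : Int) :
    ((PySem.List.pyRange 1 (max_num + 1) 1).flatMap pvBlock).Pairwise
      (fun a b => pvKey a < pvKey b) := by
  rw [List.pairwise_flatMap]
  constructor
  · intro p _
    unfold pvBlock
    rw [List.pairwise_map]
    refine ((PySem.List.pairwise_lt_pyRange_one 1 (p+1)).filter _).imp_of_mem ?_
    intro i i' hi hi' hlt
    have h1 := pvBlock_prod p _ (List.mem_map_of_mem hi)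
    have h2 := pvBlock_prod p _ (List.mem_map_of_mem hi')
    simp only [pvKey, Prod.Lex.toLex_lt_toLex]
    right
    simp only at h1 h2
    exact ⟨by rw [h1, h2], hlt⟩
  · refine (PySem.List.pairwise_lt_pyRange_one 1 (max_num+1)).imp_of_mem ?_
    intro p p' _ _ hlt x hx y hy
    have h1 := pvBlock_prod p x hx
    have h2 := pvBlock_prod p' y hy
    simp only [pvKey, Prod.Lex.toLex_lt_toLex]
    left
    omega

-- characterisation of the 'small' while-loop: divisors of p in [i, sqrt p]
theorem mem_pvSmall (p i x : Int) (hi : 1 ≤ i) :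
    x ∈ pvSmall p i ↔ i ≤ x ∧ x * x ≤ p ∧ PySem.Int.mod p x = 0 := by
  by_cases h : i * i > p
  · rw [pvSmall, dif_pos h]
    simp only [List.not_mem_nil, false_iff]
    rintro ⟨hx1, hx2, -⟩
    nlinarith
  · rw [pvSmall, dif_neg h]
    have ih := mem_pvSmall p (i + 1) x (by omega)
    by_cases hm : PySem.Int.mod p i == 0
    · rw [if_pos hm]
      rw [List.mem_cons, ih]
      constructor
      · rintro (rfl | ⟨h1, h2, h3⟩)
        · exact ⟨le_rfl, not_lt.mp h, beq_iff_eq.mp hm⟩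
        · exact ⟨by omega, h2, h3⟩
      · rintro ⟨h1, h2, h3⟩
        rcases eq_or_lt_of_le h1 with rfl | hlt
        · exact Or.inl rfl
        · exact Or.inr ⟨by omega, h2, h3⟩
    · rw [if_neg hm, ih]
      constructor
      · rintro ⟨h1, h2, h3⟩
        exact ⟨by omega, h2, h3⟩
      · rintro ⟨h1, h2, h3⟩
        rcases eq_or_lt_of_le h1 with rfl | hlt
        · exact absurd (beq_iff_eq.mpr h3) hm
        · exact ⟨by omega, h2, h3⟩
termination_by (p + 1 - i).toNat
decreasing_by
  all_goals
    rw [not_lt] at h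
    by_cases h0 : i ≤ 0
    · have : i ≤ p := by nlinarith [mul_self_nonneg i]
      omega
    · have : i ≤ p := by nlinarith
      omega

theorem pairwise_pvSmall (p i : Int) (hi : 1 ≤ i) : (pvSmall p i).Pairwise (· < ·) := by
  by_cases h : i * i > p
  · rw [pvSmall, dif_pos h]
    exact List.Pairwise.nil
  · rw [pvSmall, dif_neg h]
    have ih := pairwise_pvSmall p (i + 1) (by omega)
    by_cases hm : PySem.Int.mod p i == 0
    · rw [if_pos hm]
      refine List.Pairwise.cons (fun x hx => ?_) ih
      have := (mem_pvSmall p (i + 1) x (by omega)).mp hx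
      omega
    · rw [if_neg hm]
      exact ih
termination_by (p + 1 - i).toNat
decreasing_by
  all_goals
    rw [not_lt] at h
    by_cases h0 : i ≤ 0
    · have : i ≤ p := by nlinarith [mul_self_nonneg i]
      omega
    · have : i ≤ p := by nlinarith
      omega

-- the full divisor list: pvDivs p holds exactly the divisors of p in [1, p], ascending
theorem mem_pvDivs (p : Int) (hp : 1 ≤ p) (x : Int) :
    x ∈ pvDivs p ↔ 1 ≤ x ∧ x ≤ p ∧ PySem.Int.mod p x = 0 := by
  rw [pvDivs]
  simp only [List.mem_append, List.mem_map, List.mem_filter, List.mem_reverse,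
    Bool.not_eq_eq_eq_not, Bool.not_true, beq_eq_false_iff_ne, ne_eq]
  constructor
  · rintro (hsm | ⟨d, ⟨hdmem, hdne⟩, rfl⟩)
    · obtain ⟨h1, h2, h3⟩ := (mem_pvSmall p 1 x le_rfl).mp hsm
      exact ⟨h1, by nlinarith, h3⟩
    · obtain ⟨hd1, hd2, hd3⟩ := (mem_pvSmall p 1 d le_rfl).mp hdmem
      have hdvd : d ∣ p := Int.dvd_iff_fmod_eq_zero.mpr (by simpa [PySem.Int.mod] using hd3)
      have hcancel : d * PySem.Int.floordiv p d = p := by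
        simpa [PySem.Int.floordiv] using Int.mul_fdiv_cancel' hdvd
      have hq1 : 1 ≤ PySem.Int.floordiv p d := by nlinarith
      refine ⟨hq1, by nlinarith, ?_⟩
      have : PySem.Int.floordiv p d ∣ p := ⟨d, by linarith [hcancel]⟩
      simpa [PySem.Int.mod] using Int.dvd_iff_fmod_eq_zero.mp this
  · rintro ⟨hx1, hx2, hx3⟩
    have hdvd : x ∣ p := Int.dvd_iff_fmod_eq_zero.mpr (by simpa [PySem.Int.mod] using hx3)
    obtain ⟨c, hc⟩ := hdvd
    have hc1 : 1 ≤ c := by nlinarith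
    by_cases hsq : x * x ≤ p
    · exact Or.inl ((mem_pvSmall p 1 x le_rfl).mpr ⟨hx1, hsq, hx3⟩)
    · rw [not_le] at hsq
      refine Or.inr ⟨c, ⟨?_, ?_⟩, ?_⟩
      · apply (mem_pvSmall p 1 c le_rfl).mpr
        refine ⟨hc1, by nlinarith, ?_⟩
        have : c ∣ p := ⟨x, by linarith [hc]⟩
        simpa [PySem.Int.mod] using Int.dvd_iff_fmod_eq_zero.mp this
      · nlinarith
      · have hpc : p = c * x := by linarith [hc]
        rw [PySem.Int.floordiv, hpc]
        exact Int.mul_fdiv_cancel_left x (by omega)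

theorem pairwise_pvDivs (p : Int) (hp : 1 ≤ p) : (pvDivs p).Pairwise (· < ·) := by
  rw [pvDivs]
  apply List.pairwise_append.mpr
  refine ⟨pairwise_pvSmall p 1 le_rfl, ?_, ?_⟩
  · rw [List.pairwise_map]
    have hrev : (pvSmall p 1).reverse.Pairwise (fun a b => b < a) :=
      List.pairwise_reverse.mpr (pairwise_pvSmall p 1 le_rfl)
    refine (hrev.filter _).imp_of_mem ?_
    intro a b ha hb hba
    have ha' := (mem_pvSmall p 1 a le_rfl).mp (List.mem_reverse.mp (List.mem_of_mem_filter ha))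
    have hb' := (mem_pvSmall p 1 b le_rfl).mp (List.mem_reverse.mp (List.mem_of_mem_filter hb))
    have hAd : a ∣ p := Int.dvd_iff_fmod_eq_zero.mpr (by simpa [PySem.Int.mod] using ha'.2.2)
    have hBd : b ∣ p := Int.dvd_iff_fmod_eq_zero.mpr (by simpa [PySem.Int.mod] using hb'.2.2)
    have hA : a * PySem.Int.floordiv p a = p := by
      simpa [PySem.Int.floordiv] using Int.mul_fdiv_cancel' hAd
    have hB : b * PySem.Int.floordiv p b = p := by
      simpa [PySem.Int.floordiv] using Int.mul_fdiv_cancel' hBd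
    have hqa : 1 ≤ PySem.Int.floordiv p a := by nlinarith [ha'.1, ha'.2.1]
    nlinarith [ha'.1, hb'.1, hqa]
  · intro s hs y hy
    obtain ⟨hs1, hs2, -⟩ := (mem_pvSmall p 1 s le_rfl).mp hs
    simp only [List.mem_map, List.mem_filter, List.mem_reverse, Bool.not_eq_eq_eq_not,
      Bool.not_true, beq_eq_false_iff_ne, ne_eq] at hy
    obtain ⟨d, ⟨hdmem, hdne⟩, rfl⟩ := hy
    obtain ⟨hd1, hd2, hd3⟩ := (mem_pvSmall p 1 d le_rfl).mp hdmem
    have hdvd : d ∣ p := Int.dvd_iff_fmod_eq_zero.mpr (by simpa [PySem.Int.mod] using hd3)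
    have hD : d * PySem.Int.floordiv p d = p := by
      simpa [PySem.Int.floordiv] using Int.mul_fdiv_cancel' hdvd
    have hq1 : 1 ≤ PySem.Int.floordiv p d := by nlinarith
    have hdd : d * d < p := lt_of_le_of_ne hd2 hdne
    have hdq : d < PySem.Int.floordiv p d := by nlinarith
    nlinarith

-- two strictly increasing integer lists with the same members are equal
theorem pv_lt_ext (l1 l2 : List Int) (h1 : l1.Pairwise (· < ·)) (h2 : l2.Pairwise (· < ·))
    (hm : ∀ x, x ∈ l1 ↔ x ∈ l2) : l1 = l2 :=
  List.Perm.eq_of_pairwise (fun _ _ _ _ hab hba => le_antisymm hab hba)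
    (h1.imp le_of_lt) (h2.imp le_of_lt)
    ((List.perm_ext_iff_of_nodup (h1.imp ne_of_lt) (h2.imp ne_of_lt)).mpr hm)

theorem pvDivs_eq (p : Int) (hp : 1 ≤ p) :
    pvDivs p = (PySem.List.pyRange 1 (p + 1) 1).filter (fun i => PySem.Int.mod p i == 0) := by
  apply pv_lt_ext _ _ (pairwise_pvDivs p hp)
    ((PySem.List.pairwise_lt_pyRange_one 1 (p + 1)).filter _)
  intro x
  rw [mem_pvDivs p hp x]
  simp only [List.mem_filter, PySem.List.mem_pyRange_one, beq_iff_eq]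
  constructor
  · rintro ⟨h1, h2, h3⟩
    exact ⟨⟨h1, by omega⟩, h3⟩
  · rintro ⟨⟨h1, h2⟩, h3⟩
    exact ⟨h1, by omega, h3⟩

-- B's per-product block agrees with the range-filtered form pvBlock
theorem pvBlockB_eq (p : Int) (hp : 1 ≤ p) :
    (pvDivs p).map (fun d => (d, PySem.Int.floordiv p d)) = pvBlock p := by
  rw [pvDivs_eq p hp, pvBlock]

theorem alt_eq_flatMap (max_num : Int) :
    get_candidate_tilings_alt max_num = (PySem.List.pyRange 1 (max_num + 1) 1).flatMap pvBlock := by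
  rw [get_candidate_tilings_alt]
  have hcongr : (PySem.List.pyRange 1 (max_num + 1) 1).foldl
      (fun result p => result ++ (pvDivs p).map (fun d => (d, PySem.Int.floordiv p d))) [] =
      (PySem.List.pyRange 1 (max_num + 1) 1).foldl (fun result p => result ++ pvBlock p) [] :=
    PySem.List.foldl_congr_mem (PySem.List.pyRange 1 (max_num + 1) 1)
      (fun result p => result ++ (pvDivs p).map (fun d => (d, PySem.Int.floordiv p d)))
      (fun result p => result ++ pvBlock p) []
      (fun acc p hp => by
        show acc ++ (pvDivs p).map (fun d => (d, PySem.Int.floordiv p d)) = acc ++ pvBlock p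
        rw [pvBlockB_eq p ((PySem.List.mem_pyRange_one).mp hp).1])
  rw [hcongr, PySem.List.foldl_append_eq_flatMap, List.nil_append]

-- ===== VERDICT (by name: the statement is the Claim_ definition above) =====
theorem get_candidate_tilings_spec : Claim_equal_get_candidate_tilings := by
  intro max_num _
  show get_candidate_tilings max_num = get_candidate_tilings_alt max_num
  rw [alt_eq_flatMap]
  unfold get_candidate_tilings
  rw [show (PySem.List.pyRange 1 (max_num + 1) 1).flatMap (fun i =>
      ((PySem.List.pyRange 1 (max_num + 1) 1).filter
        (fun j => decide (i * j ≤ max_num))).map (fun j => (i, j))) = pvTilings max_num from rfl]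
  rw [sorted2_eq_sorted_lex]
  exact PySem.List.sorted_eq_of_perm_of_pairwise_lt _ _ _
    ((List.perm_ext_iff_of_nodup (nodup_alt max_num) (nodup_pvTilings max_num)).2
      (fun x => (mem_alt max_num x).trans (mem_pvTilings max_num x).symm))
    (pairwise_alt max_num)
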